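-- pv_equiv track=rewrite | github.com/gustavo-cunh/ean13 | ean13generado.py | generate_ean13_codes
-- ===== SOURCE A (Python) =====
-- def calc_ean13_check_digit(ean13_code):
--     check_sum = 0
--     for i in range(12):
--         if i % 2 == 0:
--             check_sum += int(ean13_code[i])
--         else:
--             check_sum += int(ean13_code[i]) * 3
--     check_digit = (10 - (check_sum % 10)) % 10
--     return str(check_digit)
--
-- def generate_ean13_codes(num_codes, cnpj_first_five):
--     ean13_codes = []
--     for i in range(num_codes):
--         sequential_number = str(i).zfill(4)
--         ean13_code = "789" + cnpj_first_five + sequential_number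
--         check_digit = calc_ean13_check_digit(ean13_code)
--         full_ean13_code = ean13_code + check_digit
--         ean13_codes.append(full_ean13_code)
--     return ean13_codes
-- ===== SOURCE B (Python) =====
-- def generate_ean13_codes(num_codes, cnpj_first_five):
--     if num_codes <= 0:
--         return []
--     prefix = "789" + cnpj_first_five
--     L = len(prefix)
--     # checksum contribution of the constant prefix, computed once
--     base = sum(int(c) * (3 if j % 2 else 1) for j, c in enumerate(prefix[:12]))
--     k = max(0, 12 - L)
--     weights = [3 if p % 2 else 1 for p in range(L, L + k)]
--     codes = []
--     for i in range(num_codes):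
--         seq = str(i).zfill(4)
--         s = sum(int(c) * w for c, w in zip(seq[:k], weights))
--         check_digit = (10 - (base + s) % 10) % 10
--         codes.append(prefix + seq + str(check_digit))
--     return codes
-- ===== Notes on version B (the rewrite author's own statement) =====
-- stated objective: alternative
-- what changed: B hoists the checksum contribution of the constant prefix '789'+cnpj out of the per-code loop (computed once via enumerate over the first 12 prefix chars) and per code only weighs the sequential digits that land in the first 12 positions, via a precomputed weight list zipped with seq[:k], instead of A's full 12-iteration re-scan of every code.
import Mathlib
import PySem

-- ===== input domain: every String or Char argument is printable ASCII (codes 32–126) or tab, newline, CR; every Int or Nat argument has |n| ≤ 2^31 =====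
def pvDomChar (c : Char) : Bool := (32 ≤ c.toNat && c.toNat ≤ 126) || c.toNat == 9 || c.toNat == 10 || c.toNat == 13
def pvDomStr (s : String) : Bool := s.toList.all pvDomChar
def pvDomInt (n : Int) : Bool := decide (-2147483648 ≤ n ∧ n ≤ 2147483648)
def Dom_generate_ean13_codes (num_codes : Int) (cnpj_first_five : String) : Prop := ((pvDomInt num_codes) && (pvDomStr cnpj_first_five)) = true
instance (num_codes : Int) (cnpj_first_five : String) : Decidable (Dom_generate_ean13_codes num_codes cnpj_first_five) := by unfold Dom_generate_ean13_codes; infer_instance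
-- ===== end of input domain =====

-- B hoists the checksum contribution of the constant prefix "789"+cnpj out of the per-code loop
-- and only weighs the truncated sequential digits per code (objective: alternative decomposition).

-- ===== PORT A =====
-- int(code[i]) totalized: an out-of-range index or a non-digit char yields 0 (exactly the inputs Pre_ excludes)
def pvDigitA (code : List Char) (i : Int) : Int :=
  (PySem.Int.ofChars? [PySem.List.pyGetD code i ' ']).getD 0

def calc_ean13_check_digit (ean13_code : List Char) : List Char :=
  let check_sum := (PySem.List.pyRange 0 12 1).foldl (fun check_sum i =>
    if PySem.Int.mod i 2 = 0 then
      check_sum + pvDigitA ean13_code i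
    else
      check_sum + pvDigitA ean13_code i * 3) 0
  let check_digit := PySem.Int.mod (10 - PySem.Int.mod check_sum 10) 10
  PySem.Int.toChars check_digit

def generate_ean13_codes (num_codes : Int) (cnpj_first_five : String) : List String :=
  let ean13_codes : List String := []
  (PySem.List.pyRange 0 num_codes 1).foldl (fun ean13_codes i =>
    let sequential_number := PySem.Chars.zfill (PySem.Int.toChars i) 4
    let ean13_code := ('7' :: '8' :: '9' :: cnpj_first_five.toList) ++ sequential_number
    let check_digit := calc_ean13_check_digit ean13_code
    let full_ean13_code := ean13_code ++ check_digit
    ean13_codes ++ [String.ofList full_ean13_code]) ean13_codes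

-- ===== PORT B =====
-- int(c) totalized the same way on a single char
def pvDigitB (c : Char) : Int := (PySem.Int.ofChars? [c]).getD 0

def generate_ean13_codes_alt (num_codes : Int) (cnpj_first_five : String) : List String :=
  if num_codes ≤ 0 then [] else
  let pfx : List Char := '7' :: '8' :: '9' :: cnpj_first_five.toList
  let L : Int := (pfx.length : Int)
  let base : Int := ((PySem.List.enumerate (pfx.take 12) 0).map
    (fun jc => pvDigitB jc.2 * (if PySem.Int.mod jc.1 2 ≠ 0 then 3 else 1))).sum
  let k : Int := max 0 (12 - L)
  let weights : List Int := (PySem.List.pyRange L (L + k) 1).map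
    (fun p => if PySem.Int.mod p 2 ≠ 0 then 3 else 1)
  (PySem.List.pyRange 0 num_codes 1).map (fun i =>
    let seq := PySem.Chars.zfill (PySem.Int.toChars i) 4
    let s : Int := (((PySem.List.slice seq none (some k)).zip weights).map
      (fun cw => pvDigitB cw.1 * cw.2)).sum
    let check_digit := PySem.Int.mod (10 - PySem.Int.mod (base + s) 10) 10
    String.ofList (pfx ++ seq ++ PySem.Int.toChars check_digit))

-- ===== PRECONDITION & SPEC =====
-- Pre_ excludes exactly the inputs where the Python A raises: when at least one code is
-- requested, every character of "789"+cnpj_first_five that lands in the first 12 positions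
-- must be a digit (otherwise int() raises ValueError) and len(cnpj_first_five) must be ≥ 5
-- (otherwise the code is shorter than 12 characters and ean13_code[i] raises IndexError).
def Pre_generate_ean13_codes (num_codes : Int) (cnpj_first_five : String) : Prop :=
  num_codes ≤ 0 ∨
    (5 ≤ cnpj_first_five.toList.length ∧
      ∀ j, j < min cnpj_first_five.toList.length 9 →
        PySem.Chars.isdigit (cnpj_first_five.toList.getD j ' ') = true)
instance (num_codes : Int) (cnpj_first_five : String) : Decidable (Pre_generate_ean13_codes num_codes cnpj_first_five) := by unfold Pre_generate_ean13_codes; infer_instance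

def pvWitness_generate_ean13_codes : Int × String := (3, "12345")

def Spec_generate_ean13_codes (num_codes : Int) (cnpj_first_five : String) (out : List String) : Prop := out = generate_ean13_codes_alt num_codes cnpj_first_five
instance (num_codes : Int) (cnpj_first_five : String) (out : List String) : Decidable (Spec_generate_ean13_codes num_codes cnpj_first_five out) := by unfold Spec_generate_ean13_codes; infer_instance

-- ===== CLAIM (what is proved, stated in full; the proofs are below) =====
def Claim_equal_generate_ean13_codes : Prop := ∀ (num_codes : Int) (cnpj_first_five : String), Dom_generate_ean13_codes num_codes cnpj_first_five → Pre_generate_ean13_codes num_codes cnpj_first_five → Spec_generate_ean13_codes num_codes cnpj_first_five (generate_ean13_codes num_codes cnpj_first_five)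

-- ===== LEMMAS AND PROOFS =====
-- (The two ports in fact agree on ALL inputs: both totalize the raise points identically,
-- so the proof below does not need the Dom/Pre hypotheses.)

-- the weighted EAN-13 checksum of a character list starting at (global) position off
def pvWsum : List Char → Int → Int
  | [], _ => 0
  | c :: cs, off =>
      (if PySem.Int.mod off 2 = 0 then pvDigitB c else pvDigitB c * 3) + pvWsum cs (off + 1)

-- A's check_sum loop computes pvWsum of the first 12 characters
theorem pvFoldA_aux (code : List Char) :
    ∀ (n a : Nat), a + n = 12 → ∀ acc : Int,
    (PySem.List.pyRange (a : Int) 12 1).foldl (fun check_sum i =>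
      if PySem.Int.mod i 2 = 0 then
        check_sum + pvDigitA code i
      else
        check_sum + pvDigitA code i * 3) acc
    = acc + pvWsum ((code.drop a).take n) (a : Int) := by
  intro n
  induction n with
  | zero =>
      intro a ha acc
      have h12 : (a : Int) = 12 := by omega
      rw [h12, PySem.List.pyRange_one_eq_nil le_rfl]
      simp [pvWsum]
  | succ n ih =>
      intro a ha acc
      have hlt : (a : Int) < 12 := by omega
      rw [PySem.List.pyRange_one_cons hlt]
      have hcast : (a : Int) + 1 = ((a + 1 : Nat) : Int) := by push_cast; ring
      simp only [List.foldl_cons]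
      rw [hcast, ih (a + 1) (by omega)]
      rcases hd : code.drop a with _ | ⟨c, rest⟩
      · have hlen : code.length ≤ a := by
          rw [← List.drop_eq_nil_iff]; exact hd
        have hd1 : code.drop (a + 1) = [] := by
          rw [List.drop_eq_nil_iff]; omega
        have hget : PySem.List.pyGetD code (a : Int) ' ' = ' ' := by
          rw [PySem.List.pyGetD_natCast]
          simp [List.getD, List.getElem?_eq_none (by omega : code.length ≤ a)]
        have hdig : pvDigitA code (a : Int) = 0 := by
          rw [pvDigitA, hget]; decide
        rw [hd1]
        simp [pvWsum, hdig]
      · have hget : PySem.List.pyGetD code (a : Int) ' ' = c := by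
          rw [PySem.List.pyGetD_natCast]
          have : code[a]? = some c := by
            have := List.getElem?_drop (xs := code) (i := a) (j := 0)
            rw [hd] at this; simpa using this.symm
          simp [List.getD, this]
        have hdig : pvDigitA code (a : Int) = pvDigitB c := by
          rw [pvDigitA, hget]; rfl
        have hrest : code.drop (a + 1) = rest := by
          rw [← List.tail_drop, hd]
          rfl
        rw [hrest]
        simp only [List.take_succ_cons, pvWsum, hdig, hcast]
        by_cases hm : PySem.Int.mod ((a : Nat) : Int) 2 = 0
        · simp only [if_pos hm]; ring
        · simp only [if_neg hm]; ring

theorem pvFoldA (code : List Char) :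
    (PySem.List.pyRange 0 12 1).foldl (fun check_sum i =>
      if PySem.Int.mod i 2 = 0 then
        check_sum + pvDigitA code i
      else
        check_sum + pvDigitA code i * 3) 0 = pvWsum (code.take 12) 0 := by
  have := pvFoldA_aux code 12 0 rfl 0
  simpa using this

-- B's base is pvWsum of the prefix's first 12 characters
theorem pvBaseB_aux (cs : List Char) : ∀ s : Int,
    ((PySem.List.enumerate cs s).map
      (fun jc => pvDigitB jc.2 * (if PySem.Int.mod jc.1 2 ≠ 0 then 3 else 1))).sum
    = pvWsum cs s := by
  induction cs with
  | nil => intro s; simp [PySem.List.enumerate_nil, pvWsum]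
  | cons c cs ih =>
      intro s
      rw [PySem.List.enumerate_cons]
      simp only [List.map_cons, List.sum_cons, ih (s + 1), pvWsum]
      by_cases hm : PySem.Int.mod s 2 = 0
      · rw [if_neg (not_not_intro hm), if_pos hm]; ring
      · rw [if_pos hm, if_neg hm]

-- B's zip-sum is pvWsum of the truncated sequential digits
theorem pvZipB (cs : List Char) : ∀ (off k : Int), 0 ≤ k → (cs.length : Int) ≤ k →
    ((cs.zip ((PySem.List.pyRange off (off + k) 1).map
        (fun p => if PySem.Int.mod p 2 ≠ 0 then (3:Int) else 1))).map
      (fun cw => pvDigitB cw.1 * cw.2)).sum = pvWsum cs off := by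
  induction cs with
  | nil => intro off k _ _; simp [pvWsum]
  | cons c cs ih =>
      intro off k hk hlen
      have h1 : (1 : Int) ≤ k := by simp at hlen; omega
      rw [PySem.List.pyRange_one_cons (by omega : off < off + k)]
      simp only [List.map_cons, List.zip_cons_cons, List.sum_cons]
      have hr : off + k = (off + 1) + (k - 1) := by ring
      rw [hr, ih (off + 1) (k - 1) (by omega) (by simp at hlen ⊢; omega)]
      simp only [pvWsum]
      by_cases hm : PySem.Int.mod off 2 = 0
      · rw [if_neg (not_not_intro hm), if_pos hm]; ring
      · rw [if_pos hm, if_neg hm]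

-- splitting pvWsum of (xs ++ ys).take m at the boundary of xs
theorem pvWsum_append (xs : List Char) : ∀ (ys : List Char) (m : Nat) (off : Int),
    pvWsum ((xs ++ ys).take m) off
      = pvWsum (xs.take m) off + pvWsum (ys.take (m - xs.length)) (off + (xs.length : Int)) := by
  induction xs with
  | nil => intro ys m off; simp [pvWsum]
  | cons x xs ih =>
      intro ys m off
      cases m with
      | zero => simp [pvWsum]
      | succ m =>
          simp only [List.cons_append, List.take_succ_cons, pvWsum, ih ys m (off + 1),
            List.length_cons]
          have : off + 1 + (xs.length : Int) = off + ((xs.length : Nat) + 1 : Nat) := by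
            push_cast; ring
          rw [this]
          have : m + 1 - (xs.length + 1) = m - xs.length := by omega
          rw [this]
          ring

-- per-code checksum equality: A's 12-term loop = B's hoisted base + truncated-sequence sum
theorem pvChecksum (pfx seq : List Char) :
    (PySem.List.pyRange 0 12 1).foldl (fun check_sum i =>
      if PySem.Int.mod i 2 = 0 then
        check_sum + pvDigitA (pfx ++ seq) i
      else
        check_sum + pvDigitA (pfx ++ seq) i * 3) 0
    = ((PySem.List.enumerate (pfx.take 12) 0).map
        (fun jc => pvDigitB jc.2 * (if PySem.Int.mod jc.1 2 ≠ 0 then 3 else 1))).sum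
      + (((PySem.List.slice seq none (some (max 0 (12 - (pfx.length : Int))))).zip
            ((PySem.List.pyRange (pfx.length : Int) ((pfx.length : Int) + max 0 (12 - (pfx.length : Int))) 1).map
              (fun p => if PySem.Int.mod p 2 ≠ 0 then (3:Int) else 1))).map
          (fun cw => pvDigitB cw.1 * cw.2)).sum := by
  set k : Int := max 0 (12 - (pfx.length : Int)) with hk
  have hk0 : 0 ≤ k := le_max_left _ _
  rw [pvFoldA, pvWsum_append pfx seq 12 0, pvBaseB_aux,
    PySem.List.slice_to seq hk0,
    pvZipB (seq.take k.toNat) (pfx.length : Int) k hk0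
      (by
        have := List.length_take_le k.toNat seq
        omega)]
  have h1 : (12 : Nat) - pfx.length = k.toNat := by omega
  rw [h1, zero_add]

theorem pvMain (num_codes : Int) (cnpj_first_five : String) :
    generate_ean13_codes num_codes cnpj_first_five
      = generate_ean13_codes_alt num_codes cnpj_first_five := by
  simp only [generate_ean13_codes, generate_ean13_codes_alt, calc_ean13_check_digit]
  by_cases h0 : num_codes ≤ 0
  · rw [if_pos h0, PySem.List.pyRange_one_eq_nil h0]
    rfl
  · rw [if_neg h0, PySem.List.foldl_append_singleton_eq_map]
    rw [List.nil_append]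
    apply List.map_congr_left
    intro i _
    rw [pvChecksum, List.append_assoc]

-- ===== VERDICT (by name: the statement is the Claim_ definition above) =====
theorem generate_ean13_codes_spec : Claim_equal_generate_ean13_codes := by
  intro num_codes cnpj_first_five _ _
  unfold Spec_generate_ean13_codes
  exact pvMain num_codes cnpj_first_five
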